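-- pv_equiv track=rewrite | github.com/DataResponsibly/fixed_acs_loader | acsloader/data/acs_helper.py | get_metadata_features
-- ===== SOURCE A (Python) =====
-- from typing import Dict, Iterable, List, Optional, Tuple, Union
--
-- def get_metadata_features(f_types: Optional[List[int]] = None) -> Dict[str, int]:
--     """
--     Feature type metadata (hand-curated).
--
--     Codes:
--         0: Categorical
--         1: Large categorical (>10 categories)
--         2: Ordinal
--         3: Continuous
--     """
--     feature_metadata: Dict[str, int] = {
--         "AGEP": 2,
--         "ANC": 0,
--         "CIT": 0,
--         "COW": 0,
--         "DEAR": 0,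
--         "DEYE": 0,
--         "DIS": 0,
--         "DREM": 0,
--         "ESP": 0,
--         "ESR": 0,
--         "FER": 0,
--         "JWTR": 1,
--         "MAR": 0,
--         "MIG": 0,
--         "MIL": 0,
--         "NATIVITY": 0,
--         "OCCP": 1,
--         "PINCP": 0,
--         "POBP": 1,
--         "POVPIP": 3,
--         "POWPUMA": 1,
--         "PUMA": 1,
--         "RAC1P": 0,
--         "RELP": 1,
--         "SCHL": 1,
--         "SEX": 0,
--         "ST": 1,
--         "WKHP": 2,
--         "PUBCOV": 0,
--         "JWMNP": 0,
--     }
--     if f_types is None: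
--         return feature_metadata
--
--     keys: List[str] = []
--     for f_t in f_types:
--         keys.extend([k for k, v in feature_metadata.items() if v == f_t])
--     return {k: feature_metadata[k] for k in keys if k in feature_metadata}
-- ===== SOURCE B (Python) =====
-- def get_metadata_features(f_types=None):
--     """
--     Feature type metadata (hand-curated).
--
--     Codes:
--         0: Categorical
--         1: Large categorical (>10 categories)
--         2: Ordinal
--         3: Continuous
--     """
--     feature_metadata = {
--         "AGEP": 2,
--         "ANC": 0,
--         "CIT": 0,
--         "COW": 0,
--         "DEAR": 0,
--         "DEYE": 0,
--         "DIS": 0,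
--         "DREM": 0,
--         "ESP": 0,
--         "ESR": 0,
--         "FER": 0,
--         "JWTR": 1,
--         "MAR": 0,
--         "MIG": 0,
--         "MIL": 0,
--         "NATIVITY": 0,
--         "OCCP": 1,
--         "PINCP": 0,
--         "POBP": 1,
--         "POVPIP": 3,
--         "POWPUMA": 1,
--         "PUMA": 1,
--         "RAC1P": 0,
--         "RELP": 1,
--         "SCHL": 1,
--         "SEX": 0,
--         "ST": 1,
--         "WKHP": 2,
--         "PUBCOV": 0,
--         "JWMNP": 0,
--     }
--     if f_types is None:
--         return feature_metadata
--
--     # One-time inverted index: type code -> list of (feature, code) in insertion order.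
--     groups = {}
--     for k, v in feature_metadata.items():
--         groups.setdefault(v, []).append((k, v))
--
--     result = {}
--     for t in f_types:
--         for k, v in groups.get(t, ()):
--             if k not in result:
--                 result[k] = v
--     return result
-- ===== Notes on version B (the rewrite author's own statement) =====
-- stated objective: faster
-- what changed: B builds an inverted index (type code -> features) once and answers each requested type by a direct dictionary lookup with a membership test for duplicates, instead of re-scanning the whole metadata dict and re-inserting for every requested type.
import Mathlib
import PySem

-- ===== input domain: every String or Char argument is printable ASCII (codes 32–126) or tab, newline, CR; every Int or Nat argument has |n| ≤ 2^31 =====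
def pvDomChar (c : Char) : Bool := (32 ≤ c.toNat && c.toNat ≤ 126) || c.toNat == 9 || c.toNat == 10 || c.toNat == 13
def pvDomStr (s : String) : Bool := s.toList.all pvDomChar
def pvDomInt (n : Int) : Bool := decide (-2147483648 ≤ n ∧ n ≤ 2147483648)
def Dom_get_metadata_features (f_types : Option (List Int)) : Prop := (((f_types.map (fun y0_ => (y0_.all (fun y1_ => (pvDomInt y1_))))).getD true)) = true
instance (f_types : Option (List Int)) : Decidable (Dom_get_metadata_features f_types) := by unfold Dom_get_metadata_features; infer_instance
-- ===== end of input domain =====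

-- B replaces the per-requested-type rescans of the metadata dict by a one-pass inverted index
-- (type code -> features) with direct lookups; an explicit membership test replaces dict re-insertion.

-- The hand-curated dict literal both Pythons contain verbatim.
def featureMetadata : PySem.Dict String Int := PySem.Dict.ofList
  [("AGEP", 2), ("ANC", 0), ("CIT", 0), ("COW", 0), ("DEAR", 0), ("DEYE", 0),
   ("DIS", 0), ("DREM", 0), ("ESP", 0), ("ESR", 0), ("FER", 0), ("JWTR", 1),
   ("MAR", 0), ("MIG", 0), ("MIL", 0), ("NATIVITY", 0), ("OCCP", 1), ("PINCP", 0),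
   ("POBP", 1), ("POVPIP", 3), ("POWPUMA", 1), ("PUMA", 1), ("RAC1P", 0),
   ("RELP", 1), ("SCHL", 1), ("SEX", 0), ("ST", 1), ("WKHP", 2), ("PUBCOV", 0),
   ("JWMNP", 0)]

-- ===== PORT A =====
def get_metadata_features (f_types : Option (List Int)) : List (String × Int) :=
  match f_types with
  | none => featureMetadata.items
  | some ts =>
    -- keys.extend([k for k, v in feature_metadata.items() if v == f_t]) per f_t
    let keys : List String :=
      ts.foldl (fun ks t =>
        ks ++ (featureMetadata.items.filter (fun p => p.2 == t)).map Prod.fst) []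
    -- {k: feature_metadata[k] for k in keys if k in feature_metadata}
    (keys.foldl (fun d k =>
      match featureMetadata.get? k with
      | some v => d.insert k v
      | none => d) PySem.Dict.empty).items

-- ===== PORT B =====
-- groups.setdefault(v, []).append((k, v))  over feature_metadata.items()
def groupsB : PySem.Dict Int (List (String × Int)) :=
  featureMetadata.items.foldl (fun g p => g.modify p.2 [] (fun l => l ++ [p])) PySem.Dict.empty

def get_metadata_features_alt (f_types : Option (List Int)) : List (String × Int) :=
  match f_types with
  | none => featureMetadata.items
  | some ts =>
    (ts.foldl (fun d t =>
      (groupsB.getD t []).foldl (fun d p =>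
        if d.contains p.1 then d else d.insert p.1 p.2) d) PySem.Dict.empty).items

-- ===== PRECONDITION & SPEC =====
def Spec_get_metadata_features (f_types : Option (List Int)) (out : List (String × Int)) : Prop := out = get_metadata_features_alt f_types
instance (f_types : Option (List Int)) (out : List (String × Int)) : Decidable (Spec_get_metadata_features f_types out) := by unfold Spec_get_metadata_features; infer_instance

-- ===== CLAIM (what is proved, stated in full; the proofs are below) =====
def Claim_equal_get_metadata_features : Prop := ∀ (f_types : Option (List Int)), Dom_get_metadata_features f_types → Spec_get_metadata_features f_types (get_metadata_features f_types)

-- ===== LEMMAS AND PROOFS =====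

theorem fm_nodup : featureMetadata.keys.Nodup := by decide

-- the inverted index looked up at t is exactly A's filter of the metadata at t
theorem groupsB_getD (t : Int) :
    groupsB.getD t [] = featureMetadata.items.filter (fun p => p.2 == t) := by
  unfold groupsB
  have hswap :
      featureMetadata.items.foldl (fun g p => g.modify p.2 [] (fun l => l ++ [p]))
        PySem.Dict.empty
      = (featureMetadata.items.map (fun p => (p.2, p))).foldl
          (fun g (q : Int × (String × Int)) => g.modify q.1 [] (fun l => l ++ [q.2]))
          PySem.Dict.empty :=
    (List.foldl_map (f := fun (p : String × Int) => (p.2, p))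
      (g := fun g (q : Int × (String × Int)) => g.modify q.1 [] (fun l => l ++ [q.2]))
      (l := featureMetadata.items) (init := PySem.Dict.empty)).symm
  rw [hswap, PySem.Dict.getD_foldl_modify_append]
  simp [List.filter_map, Function.comp_def]

-- re-inserting a pair that is already present leaves the dict unchanged
theorem insert_of_mem_items (d : PySem.Dict String Int) (k : String) (v : Int)
    (hn : d.keys.Nodup) (hm : (k, v) ∈ d.items) : d.insert k v = d := by
  apply PySem.Dict.ext
  rw [PySem.Dict.items_insert_of_contains d v
    ((PySem.Dict.contains_iff_mem_keys d k).2 (PySem.Dict.mem_keys_of_mem_items d hm))]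
  have hcongr : ∀ p ∈ d.items,
      (if (p.1 == k) = true then (k, v) else p) = id p := by
    intro p hp
    by_cases h : (p.1 == k) = true
    · have hk : p.1 = k := by simpa using h
      have h1 := PySem.Dict.get?_of_mem_items d hm hn
      have h2 := PySem.Dict.get?_of_mem_items d (k := p.1) (v := p.2) (by simpa using hp) hn
      rw [hk, h1] at h2
      have hv : v = p.2 := by simpa using h2
      obtain ⟨a, b⟩ := p
      simp at hk hv ⊢
      intro _
      exact ⟨hk.symm, hv⟩
    · simp [h]
  rw [List.map_congr_left hcongr, List.map_id]

def InvD (d : PySem.Dict String Int) : Prop :=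
  d.keys.Nodup ∧ ∀ p ∈ d.items, p ∈ featureMetadata.items

-- one step: A's re-insert equals B's guarded insert, and the invariant is kept
theorem step_eq (d : PySem.Dict String Int) (p : String × Int)
    (hp : p ∈ featureMetadata.items) (hd : InvD d) :
    ((match featureMetadata.get? p.1 with
      | some v => d.insert p.1 v
      | none => d)
      = (if d.contains p.1 then d else d.insert p.1 p.2))
    ∧ InvD (if d.contains p.1 then d else d.insert p.1 p.2) := by
  obtain ⟨hn, hsub⟩ := hd
  have hget : featureMetadata.get? p.1 = some p.2 :=
    PySem.Dict.get?_of_mem_items _ (by simpa using hp) fm_nodup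
  rw [hget]
  by_cases hc : d.contains p.1 = true
  · have hk : p.1 ∈ d.keys := (PySem.Dict.contains_iff_mem_keys d p.1).1 hc
    obtain ⟨q, hq, hq1⟩ : ∃ q ∈ d.items, q.1 = p.1 := by
      simpa [PySem.Dict.keys, List.mem_map] using hk
    have hqfm := hsub q hq
    have h1 := PySem.Dict.get?_of_mem_items featureMetadata (k := q.1) (v := q.2)
      (by simpa using hqfm) fm_nodup
    rw [hq1, hget] at h1
    have hqP : q = p := by
      obtain ⟨a, b⟩ := q; obtain ⟨c, e⟩ := p
      simp_all
    rw [hqP] at hq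
    constructor
    · rw [if_pos hc]
      exact insert_of_mem_items d p.1 p.2 hn (by simpa using hq)
    · rw [if_pos hc]; exact ⟨hn, hsub⟩
  · rw [if_neg hc]
    refine ⟨rfl, PySem.Dict.nodup_keys_insert d p.1 p.2 hn, ?_⟩
    intro q hq
    rcases (PySem.Dict.mem_items_insert d p.1 p.2 q).1 hq with h | h
    · rw [h]; simpa using hp
    · exact hsub q h.1

-- inner loops agree over any list of metadata pairs
theorem inner_eq (l : List (String × Int)) (d : PySem.Dict String Int)
    (hl : ∀ p ∈ l, p ∈ featureMetadata.items) (hd : InvD d) :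
    (l.foldl (fun d (p : String × Int) =>
        match featureMetadata.get? p.1 with
        | some v => d.insert p.1 v
        | none => d) d
      = l.foldl (fun d p => if d.contains p.1 then d else d.insert p.1 p.2) d)
    ∧ InvD (l.foldl (fun d p => if d.contains p.1 then d else d.insert p.1 p.2) d) := by
  induction l generalizing d with
  | nil => exact ⟨rfl, hd⟩
  | cons p l ih =>
    have hp := hl p (by simp)
    obtain ⟨he, hinv⟩ := step_eq d p hp hd
    simp only [List.foldl_cons, he]
    exact ih _ (fun q hq => hl q (by simp [hq])) hinv

-- outer loops agree
theorem outer_eq (ts : List Int) (d : PySem.Dict String Int) (hd : InvD d) :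
    ts.foldl (fun d t =>
      ((featureMetadata.items.filter (fun p => p.2 == t)).foldl (fun d (p : String × Int) =>
        match featureMetadata.get? p.1 with
        | some v => d.insert p.1 v
        | none => d) d)) d
    = ts.foldl (fun d t =>
      ((featureMetadata.items.filter (fun p => p.2 == t)).foldl (fun d p =>
        if d.contains p.1 then d else d.insert p.1 p.2) d)) d := by
  induction ts generalizing d with
  | nil => rfl
  | cons t ts ih =>
    simp only [List.foldl_cons]
    obtain ⟨he, hinv⟩ := inner_eq (featureMetadata.items.filter (fun p => p.2 == t)) d
      (fun p hp => (List.mem_filter.1 hp).1) hd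
    rw [he]
    exact ih _ hinv

theorem invd_empty : InvD PySem.Dict.empty := by
  constructor
  · simp [PySem.Dict.keys_empty]
  · intro p hp; simp [PySem.Dict.empty] at hp

-- ===== VERDICT (by name: the statement is the Claim_ definition above) =====
theorem get_metadata_features_spec : Claim_equal_get_metadata_features := by
  intro f_types _
  unfold Spec_get_metadata_features get_metadata_features get_metadata_features_alt
  match f_types with
  | none => rfl
  | some ts =>
    simp only [groupsB_getD]
    congr 1
    rw [PySem.List.foldl_append_eq_flatMap, List.nil_append,
      List.flatMap_def, List.foldl_flatten, List.foldl_map]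
    simp only [List.foldl_map]
    exact outer_eq ts PySem.Dict.empty invd_empty
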